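-- pv_equiv track=rewrite | github.com/KotobaSuke/eusophius | handict.py | nanToIPA
-- ===== SOURCE A (Python) =====
-- def nanToIPA(nan: str) -> str:
--     nan = nan.strip('*').strip('[').strip(']').strip('(').strip(')').replace("ts",
--                                                        'c').replace("nn", 'N')
--     nan = nan.replace("ok", "ook").replace("om", "oom").replace("on", "oon")
--     ipa = ""
--     mapping = {
--         'p': 'p',
--         "ph": "pʰ",
--         'b': 'b',
--         'm': 'm',
--         't': 't',
--         "th": "tʰ",
--         'n': 'n',
--         'c': "ts",
--         "ch": "tsʰ",
--         'j': "dz",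
--         's': 's',
--         'l': 'l',
--         'k': 'k',
--         "kh": "kʰ",
--         'g': 'g',
--         "ng": 'ŋ',
--         'h': 'ʔ',
--         'a': 'a',
--         'e': 'e',
--         'i': 'i',
--         'o': 'ə',
--         "oo": 'ɔ',
--         'u': 'u',
--         "aN": "ã",
--         "eN": "ẽ",
--         "iN": "ĩ",
--         "oN": "ɔ̃",
--         "uN": "ũ",
--         '1': "⁴⁴",
--         '2': "⁵¹",
--         '3': "³¹",
--         '4': '³',
--         '5': "²⁴",
--         '7': "³³",
--         '8': '⁵'
--     }
--     i = 0
--     while i in range(len(nan)):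
--         if i != len(nan) - 1 and nan[i : i + 2] in mapping:
--             ipa += mapping[nan[i : i + 2]]
--             i += 2
--         else:
--             ipa += mapping[nan[i]]
--             i += 1
--     ipa = ipa.replace("si",
--                       "ɕi").replace("zi", "ʑi").replace("ia", "iɛ").replace(
--                           "iŋ", "ɪeŋ").replace("ik", "ɪek")
--     if ipa.startswith('ʔ'):
--         ipa = 'h' + ipa[1:]
--     return '/' + ipa + '/'
-- ===== SOURCE B (Python) =====
-- def nanToIPA(nan: str) -> str:
--     nan = nan.strip('*').strip('[').strip(']').strip('(').strip(')').replace("ts",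
--                                                        'c').replace("nn", 'N')
--     nan = nan.replace("ok", "ook").replace("om", "oom").replace("on", "oon")
--     # collapse every two-letter unit into a unique placeholder letter, then
--     # transliterate character by character with a single table join
--     for digraph, mark in (("aN", 'A'), ("eN", 'E'), ("iN", 'I'), ("oN", 'Q'),
--                           ("uN", 'U'), ("ph", 'P'), ("th", 'T'), ("ch", 'C'),
--                           ("kh", 'K'), ("ng", 'G'), ("oo", 'O')):
--         nan = nan.replace(digraph, mark)
--     table = {
--         'p': 'p', 'b': 'b', 'm': 'm', 't': 't', 'n': 'n', 'c': "ts",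
--         'j': "dz", 's': 's', 'l': 'l', 'k': 'k', 'g': 'g', 'h': 'ʔ',
--         'a': 'a', 'e': 'e', 'i': 'i', 'o': 'ə', 'u': 'u',
--         '1': "⁴⁴", '2': "⁵¹", '3': "³¹", '4': '³', '5': "²⁴", '7': "³³",
--         '8': '⁵',
--         'A': "a\u0303", 'E': "e\u0303", 'I': "i\u0303", 'Q': "\u0254\u0303", 'U': "u\u0303",
--         'P': "pʰ", 'T': "tʰ", 'C': "tsʰ", 'K': "kʰ", 'G': 'ŋ', 'O': 'ɔ',
--     }
--     ipa = ''.join(table[ch] for ch in nan)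
--     ipa = ipa.replace("si",
--                       "ɕi").replace("zi", "ʑi").replace("ia", "iɛ").replace(
--                           "iŋ", "ɪeŋ").replace("ik", "ɪek")
--     if ipa.startswith('ʔ'):
--         ipa = 'h' + ipa[1:]
--     return '/' + ipa + '/'
-- ===== Notes on version B (the rewrite author's own statement) =====
-- stated objective: alternative
-- what changed: B replaces A's index-jumping maximal-munch while-loop (with its 2-char-slice dict probes) by a fixed chain of global digraph replacements into unique placeholder letters followed by a single per-character table join; pre- and post-processing replace chains are kept.
import Mathlib
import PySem

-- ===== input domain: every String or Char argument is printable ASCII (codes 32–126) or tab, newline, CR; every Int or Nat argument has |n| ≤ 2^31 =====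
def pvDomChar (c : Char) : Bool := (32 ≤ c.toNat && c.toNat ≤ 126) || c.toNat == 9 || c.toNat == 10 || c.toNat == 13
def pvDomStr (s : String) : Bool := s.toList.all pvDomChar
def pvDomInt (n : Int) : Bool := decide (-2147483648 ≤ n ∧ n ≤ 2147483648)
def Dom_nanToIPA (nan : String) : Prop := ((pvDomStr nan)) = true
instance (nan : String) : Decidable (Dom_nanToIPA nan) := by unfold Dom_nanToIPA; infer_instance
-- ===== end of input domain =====

set_option maxRecDepth 8192
set_option maxHeartbeats 1000000


-- B replaces A's index-jumping maximal-munch while-loop by a fixed chain of global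
-- digraph replacements into placeholder letters followed by a single per-character
-- table join (objective: alternative, same cost).

-- Shared pre/post processing: both Pythons carry these identical strip/replace chains.
def pvPre (l : List Char) : List Char :=
  let s := PySem.Chars.stripChars l ['*']
  let s := PySem.Chars.stripChars s ['[']
  let s := PySem.Chars.stripChars s [']']
  let s := PySem.Chars.stripChars s ['(']
  let s := PySem.Chars.stripChars s [')']
  let s := PySem.Chars.replace s ['t','s'] ['c']
  let s := PySem.Chars.replace s ['n','n'] ['N']
  let s := PySem.Chars.replace s ['o','k'] ['o','o','k']
  let s := PySem.Chars.replace s ['o','m'] ['o','o','m']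
  PySem.Chars.replace s ['o','n'] ['o','o','n']

def pvPost (ipa : List Char) : String :=
  let i := PySem.Chars.replace ipa ['s','i'] ['ɕ','i']
  let i := PySem.Chars.replace i ['z','i'] ['ʑ','i']
  let i := PySem.Chars.replace i ['i','a'] ['i','ɛ']
  let i := PySem.Chars.replace i ['i','ŋ'] ['ɪ','e','ŋ']
  let i := PySem.Chars.replace i ['i','k'] ['ɪ','e','k']
  let i := if PySem.Chars.startswith i ['ʔ'] then 'h' :: PySem.List.slice i (some 1) none else i
  String.ofList ('/' :: (i ++ ['/']))

-- ===== PORT A =====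
def pvMapA : PySem.Dict (List Char) (List Char) := PySem.Dict.mk [
  (['p'], ['p']), (['p','h'], ['p','ʰ']), (['b'], ['b']), (['m'], ['m']),
  (['t'], ['t']), (['t','h'], ['t','ʰ']), (['n'], ['n']), (['c'], ['t','s']),
  (['c','h'], ['t','s','ʰ']), (['j'], ['d','z']), (['s'], ['s']), (['l'], ['l']),
  (['k'], ['k']), (['k','h'], ['k','ʰ']), (['g'], ['g']), (['n','g'], ['ŋ']),
  (['h'], ['ʔ']), (['a'], ['a']), (['e'], ['e']), (['i'], ['i']), (['o'], ['ə']),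
  (['o','o'], ['ɔ']), (['u'], ['u']), (['a','N'], ['a','\u0303']),
  (['e','N'], ['e','\u0303']), (['i','N'], ['i','\u0303']),
  (['o','N'], ['ɔ','\u0303']), (['u','N'], ['u','\u0303']),
  (['1'], ['⁴','⁴']), (['2'], ['⁵','¹']), (['3'], ['³','¹']), (['4'], ['³']),
  (['5'], ['²','⁴']), (['7'], ['³','³']), (['8'], ['⁵'])]

-- A's while-loop over the index i; the `.getD … []` defaults are never reached under
-- Pre_nanToIPA (they are exactly Python's KeyError / IndexError spots).
def pvLoopA (s : List Char) (i : Nat) (ipa : List Char) : List Char :=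
  if _h : i < s.length then
    if i ≠ s.length - 1 ∧ pvMapA.contains (PySem.List.slice s (some (i : Int)) (some ((i : Int) + 2))) then
      pvLoopA s (i + 2) (ipa ++ pvMapA.getD (PySem.List.slice s (some (i : Int)) (some ((i : Int) + 2))) [])
    else
      pvLoopA s (i + 1) (ipa ++ pvMapA.getD [(PySem.List.pyGet? s (i : Int)).getD ' '] [])
  else ipa
termination_by s.length - i

def nanToIPA (nan : String) : String :=
  pvPost (pvLoopA (pvPre nan.toList) 0 [])

-- ===== PORT B =====
def pvStages : List (List Char × List Char) :=
  [(['a','N'], ['A']), (['e','N'], ['E']), (['i','N'], ['I']), (['o','N'], ['Q']),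
   (['u','N'], ['U']), (['p','h'], ['P']), (['t','h'], ['T']), (['c','h'], ['C']),
   (['k','h'], ['K']), (['n','g'], ['G']), (['o','o'], ['O'])]

def pvTableB : PySem.Dict Char (List Char) := PySem.Dict.mk [
  ('p', ['p']), ('b', ['b']), ('m', ['m']), ('t', ['t']), ('n', ['n']),
  ('c', ['t','s']), ('j', ['d','z']), ('s', ['s']), ('l', ['l']), ('k', ['k']),
  ('g', ['g']), ('h', ['ʔ']), ('a', ['a']), ('e', ['e']), ('i', ['i']),
  ('o', ['ə']), ('u', ['u']), ('1', ['⁴','⁴']), ('2', ['⁵','¹']), ('3', ['³','¹']),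
  ('4', ['³']), ('5', ['²','⁴']), ('7', ['³','³']), ('8', ['⁵']),
  ('A', ['a','\u0303']), ('E', ['e','\u0303']), ('I', ['i','\u0303']),
  ('Q', ['ɔ','\u0303']), ('U', ['u','\u0303']), ('P', ['p','ʰ']),
  ('T', ['t','ʰ']), ('C', ['t','s','ʰ']), ('K', ['k','ʰ']), ('G', ['ŋ']),
  ('O', ['ɔ'])]

def nanToIPA_alt (nan : String) : String :=
  let s := pvPre nan.toList
  let s := pvStages.foldl (fun acc pr => PySem.Chars.replace acc pr.1 pr.2) s
  pvPost (s.flatMap (fun c => pvTableB.getD c []))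

-- ===== PRECONDITION & SPEC =====
-- Exactly the inputs on which A's dict lookups all succeed (no KeyError): after the
-- preprocessing chain every character is one of A's one-letter keys or the nasal
-- marker 'N', and every 'N' follows a/e/i/u or an odd run of 'o's (A's greedy
-- pairing consumes 'oo' first, so an even 'o'-run leaves the 'N' alone and raises).
def pvAllowed : List Char :=
  ['p','b','m','t','n','c','j','s','l','k','g','h','a','e','i','o','u',
   '1','2','3','4','5','7','8','N']

def pvNScan : Char → Bool → List Char → Bool
  | _, _, [] => true
  | prev, oddO, c :: t =>
    if c = 'N' then
      (prev == 'a' || prev == 'e' || prev == 'i' || prev == 'u' ||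
        (prev == 'o' && oddO)) && pvNScan 'N' false t
    else pvNScan c (if c == 'o' then !oddO else false) t

def Pre_nanToIPA (nan : String) : Prop :=
  ((pvPre nan.toList).all (pvAllowed.contains ·)) = true ∧
    pvNScan '^' false (pvPre nan.toList) = true
instance (nan : String) : Decidable (Pre_nanToIPA nan) := by unfold Pre_nanToIPA; infer_instance

def pvWitness_nanToIPA : String := "phang1"

def Spec_nanToIPA (nan : String) (out : String) : Prop := out = nanToIPA_alt nan
instance (nan : String) (out : String) : Decidable (Spec_nanToIPA nan out) := by unfold Spec_nanToIPA; infer_instance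

-- ===== CLAIM (what is proved, stated in full; the proofs are below) =====
def Claim_equal_nanToIPA : Prop := ∀ (nan : String), Dom_nanToIPA nan → Pre_nanToIPA nan → Spec_nanToIPA nan (nanToIPA nan)


-- ===== LEMMAS AND PROOFS =====

-- Unfolding equations for PySem's replace loop (2-char pattern), and its structural form.
def pvRepl2 (x y : Char) (nw : List Char) : List Char → List Char
  | [] => []
  | [c] => [c]
  | c :: d :: t => if c = x ∧ d = y then nw ++ pvRepl2 x y nw t else c :: pvRepl2 x y nw (d :: t)

theorem pvGo_zero (old nw : List Char) (l acc : List Char) :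
    PySem.Chars.replace.go old nw 0 l acc = acc.reverse ++ l := by
  simp [PySem.Chars.replace.go]

theorem pvGo_nil (old nw : List Char) (f : Nat) (acc : List Char) :
    PySem.Chars.replace.go old nw f [] acc = acc.reverse := by
  cases f <;> simp [PySem.Chars.replace.go]

theorem pvGo_succ (old nw : List Char) (f : Nat) (c : Char) (t acc : List Char) :
    PySem.Chars.replace.go old nw (f+1) (c::t) acc =
      if old.isPrefixOf (c::t) then PySem.Chars.replace.go old nw f (List.drop old.length (c::t)) (nw.reverse ++ acc)
      else PySem.Chars.replace.go old nw f t (c :: acc) := by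
  rfl

theorem pvGo_acc (old nw : List Char) : ∀ (f : Nat) (l acc : List Char),
    PySem.Chars.replace.go old nw f l acc = acc.reverse ++ PySem.Chars.replace.go old nw f l [] := by
  intro f
  induction f with
  | zero => intro l acc; simp [pvGo_zero]
  | succ f ih =>
    intro l acc
    cases l with
    | nil => simp [pvGo_nil]
    | cons c t =>
      rw [pvGo_succ, pvGo_succ]
      split
      · rw [ih _ (nw.reverse ++ acc), ih _ (nw.reverse ++ [])]
        simp
      · rw [ih _ (c :: acc), ih _ [c]]
        simp

theorem pvGo_ge (x y : Char) (nw : List Char) : ∀ (f : Nat) (l : List Char), l.length ≤ f →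
    PySem.Chars.replace.go [x,y] nw f l [] = pvRepl2 x y nw l := by
  intro f
  induction f with
  | zero =>
    intro l hl
    rw [List.length_eq_zero_iff.mp (Nat.le_zero.mp hl)]
    simp [pvGo_zero, pvRepl2]
  | succ f ih =>
    intro l hl
    cases l with
    | nil => simp [pvGo_nil, pvRepl2]
    | cons c t =>
      rw [pvGo_succ]
      by_cases hp : List.isPrefixOf [x,y] (c::t)
      · rcases t with _ | ⟨d, t'⟩
        · simp [List.isPrefixOf] at hp
        · simp only [List.isPrefixOf, Bool.and_true, Bool.and_eq_true, beq_iff_eq] at hp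
          obtain ⟨rfl, rfl⟩ := hp
          simp only [List.isPrefixOf, beq_self_eq_true, Bool.and_self, if_true]
          rw [pvGo_acc]
          simp only [List.length, List.drop]
          rw [ih t' (by simp at hl; omega)]
          simp [pvRepl2]
      · rw [if_neg (by simpa using hp)]
        rw [pvGo_acc]
        rw [ih t (by simp at hl; omega)]
        rcases t with _ | ⟨d, t'⟩
        · simp [pvRepl2]
        · simp only [List.isPrefixOf, Bool.and_eq_true, beq_iff_eq] at hp
          simp only [pvRepl2]
          rw [if_neg (by intro ⟨h1,h2⟩; exact hp ⟨h1.symm, h2.symm, by simp⟩)]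
          simp

theorem pvReplace_eq_repl2 (x y : Char) (nw l : List Char) :
    PySem.Chars.replace l [x,y] nw = pvRepl2 x y nw l := by
  show (if ([x,y] : List Char).isEmpty then _ else PySem.Chars.replace.go [x,y] nw l.length l []) = _
  rw [if_neg (by simp)]
  exact pvGo_ge x y nw l.length l le_rfl

theorem pvRepl2_head (x y ψ : Char) (l : List Char) (d : Char)
    (h : (pvRepl2 x y [ψ] l).head? = some d) : l.head? = some d ∨ d = ψ := by
  rcases l with _ | ⟨c, _ | ⟨e, t⟩⟩
  · simp [pvRepl2] at h
  · simp [pvRepl2] at h; simp [h]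
  · simp only [pvRepl2] at h
    split at h
    · right; simpa using h.symm
    · left; simpa using h

-- The placeholder letters and the closed character sets used in the stage lemmas.
def pvPH : List Char := ['A','E','I','Q','U','P','T','C','K','G','O']
def pvHs2 : List Char :=
  ['p','b','m','t','n','c','j','s','l','k','g','h','a','e','i','o','u',
   '1','2','3','4','5','7','8'] ++ pvPH
def pvHs3 : List Char := pvAllowed ++ pvPH

def pvRun (S : List (List Char × List Char)) (l : List Char) : List Char :=
  S.foldl (fun acc pr => PySem.Chars.replace acc pr.1 pr.2) l

theorem pvRun_nil (S : List (List Char × List Char))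
    (h : ∀ pr ∈ S, ∃ x y ψ, pr = ([x,y],[ψ])) : pvRun S [] = [] := by
  induction S with
  | nil => rfl
  | cons pr S ih =>
    obtain ⟨x, y, ψ, rfl⟩ := h pr List.mem_cons_self
    show pvRun S (PySem.Chars.replace [] [x,y] [ψ]) = []
    rw [pvReplace_eq_repl2]
    exact ih (fun q hq => h q (List.mem_cons_of_mem _ hq))

theorem pvRun_single (S : List (List Char × List Char))
    (h : ∀ pr ∈ S, ∃ x y ψ, pr = ([x,y],[ψ])) (c : Char) : pvRun S [c] = [c] := by
  induction S with
  | nil => rfl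
  | cons pr S ih =>
    obtain ⟨x, y, ψ, rfl⟩ := h pr List.mem_cons_self
    show pvRun S (PySem.Chars.replace [c] [x,y] [ψ]) = [c]
    rw [pvReplace_eq_repl2]
    exact ih (fun q hq => h q (List.mem_cons_of_mem _ hq))

theorem pvRun_cons : ∀ (S : List (List Char × List Char)) (c : Char) (l : List Char) (hs : List Char),
    (∀ pr ∈ S, ∃ x y ψ, pr = ([x,y],[ψ]) ∧ (x ≠ c ∨ y ∉ hs) ∧ ψ ∈ hs) →
    (∀ d, l.head? = some d → d ∈ hs) →
    pvRun S (c :: l) = c :: pvRun S l := by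
  intro S
  induction S with
  | nil => intro c l hs _ _; rfl
  | cons pr S ih =>
    intro c l hs hS hl
    obtain ⟨x, y, ψ, rfl, hxy, hψ⟩ := hS pr List.mem_cons_self
    show pvRun S (PySem.Chars.replace (c :: l) [x,y] [ψ]) = c :: pvRun S (PySem.Chars.replace l [x,y] [ψ])
    rw [pvReplace_eq_repl2, pvReplace_eq_repl2]
    have hstep : pvRepl2 x y [ψ] (c :: l) = c :: pvRepl2 x y [ψ] l := by
      rcases l with _ | ⟨d, t⟩
      · simp [pvRepl2]
      · simp only [pvRepl2]
        rw [if_neg]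
        rintro ⟨hdx, hdy⟩
        rcases hxy with h | h
        · exact h hdx.symm
        · exact h (hdy ▸ hl d rfl)
    rw [hstep]
    refine ih c (pvRepl2 x y [ψ] l) hs (fun q hq => hS q (List.mem_cons_of_mem _ hq)) ?_
    intro d hd
    rcases pvRepl2_head x y ψ l d hd with h | rfl
    · exact hl d h
    · exact hψ

theorem pvRun_head : ∀ (S : List (List Char × List Char)) (l : List Char) (hs : List Char),
    (∀ pr ∈ S, ∃ x y ψ, pr = ([x,y],[ψ]) ∧ ψ ∈ hs) →
    (∀ d, l.head? = some d → d ∈ hs) →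
    (∀ d, (pvRun S l).head? = some d → d ∈ hs) := by
  intro S
  induction S with
  | nil => intro l hs _ hl; exact hl
  | cons pr S ih =>
    intro l hs hS hl
    obtain ⟨x, y, ψ, rfl, hψ⟩ := hS pr List.mem_cons_self
    show ∀ d, (pvRun S (PySem.Chars.replace l [x,y] [ψ])).head? = some d → d ∈ hs
    refine ih _ hs (fun q hq => hS q (List.mem_cons_of_mem _ hq)) ?_
    intro d hd
    rw [pvReplace_eq_repl2] at hd
    rcases pvRepl2_head x y ψ l d hd with h | rfl
    · exact hl d h
    · exact hψ

theorem pvRun_append (S1 S2 : List (List Char × List Char)) (l : List Char) :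
    pvRun (S1 ++ S2) l = pvRun S2 (pvRun S1 l) := by
  simp [pvRun, List.foldl_append]

theorem pvRun_match (S1 S2 : List (List Char × List Char)) (x y ψ : Char) (t : List Char)
    (h1 : ∀ pr ∈ S1, ∃ a b φ, pr = ([a,b],[φ]) ∧ (a ≠ x ∨ b ∉ (y :: pvPH)) ∧ φ ∈ (y :: pvPH))
    (h2 : ∀ pr ∈ S1, ∃ a b φ, pr = ([a,b],[φ]) ∧ (a ≠ y ∨ b ∉ pvHs2) ∧ φ ∈ pvHs2)
    (h3 : ∀ pr ∈ S2, ∃ a b φ, pr = ([a,b],[φ]) ∧ a ≠ ψ ∧ φ ∈ pvHs3)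
    (hψ3 : ψ ∈ pvHs3)
    (hht2 : ∀ d, t.head? = some d → d ∈ pvHs2)
    (hht3 : ∀ d, t.head? = some d → d ∈ pvHs3) :
    pvRun (S1 ++ ([x,y],[ψ]) :: S2) (x :: y :: t) = ψ :: pvRun (S1 ++ ([x,y],[ψ]) :: S2) t := by
  rw [pvRun_append, pvRun_append]
  have e1 : pvRun S1 (x :: y :: t) = x :: y :: pvRun S1 t := by
    rw [pvRun_cons S1 x (y :: t) (y :: pvPH) h1 (by intro d hd; simp at hd; simp [hd])]
    rw [pvRun_cons S1 y t pvHs2 h2 hht2]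
  rw [e1]
  show pvRun S2 (PySem.Chars.replace (x :: y :: pvRun S1 t) [x,y] [ψ]) =
    ψ :: pvRun S2 (PySem.Chars.replace (pvRun S1 t) [x,y] [ψ])
  rw [pvReplace_eq_repl2, pvReplace_eq_repl2]
  have hstep : pvRepl2 x y [ψ] (x :: y :: pvRun S1 t) = ψ :: pvRepl2 x y [ψ] (pvRun S1 t) := by
    simp [pvRepl2]
  rw [hstep]
  have hS1hs3 : ∀ pr ∈ S1, ∃ a b φ, pr = (([a,b] : List Char),([φ] : List Char)) ∧ φ ∈ pvHs3 := by
    have hsub : pvHs2.all (fun c => pvHs3.contains c) = true := by decide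
    intro q hq
    obtain ⟨a, b, φ, rfl, _, hφ⟩ := h2 q hq
    exact ⟨a, b, φ, rfl, by simpa using List.all_eq_true.mp hsub φ hφ⟩
  refine pvRun_cons S2 ψ _ pvHs3
    (fun q hq => by obtain ⟨a, b, φ, rfl, ha, hφ⟩ := h3 q hq; exact ⟨a, b, φ, rfl, Or.inl ha, hφ⟩) ?_
  intro d hd
  rcases pvRepl2_head x y ψ _ d hd with h | rfl
  · exact pvRun_head S1 t pvHs3 hS1hs3 hht3 d h
  · exact hψ3

def pvCmap (l : List Char) : List Char := l.flatMap (fun c => pvTableB.getD c [])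

def pvTok : List Char → List Char
  | [] => []
  | [a] => pvMapA.getD [a] []
  | a :: b :: t =>
    if pvMapA.contains [a,b] then pvMapA.getD [a,b] [] ++ pvTok t
    else pvMapA.getD [a] [] ++ pvTok (b :: t)

-- Scan facts
theorem pvNScan_congr : ∀ (t : List Char) (p q : Char) (o1 o2 : Bool),
    t.head? ≠ some 'N' → (t.head? = some 'o' → o1 = o2) →
    pvNScan p o1 t = pvNScan q o2 t := by
  intro t p q o1 o2 hN ho
  cases t with
  | nil => rfl
  | cons c t =>
    have hc : c ≠ 'N' := by intro h; exact hN (by simp [h])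
    show pvNScan p o1 (c :: t) = pvNScan q o2 (c :: t)
    simp only [pvNScan, if_neg hc]
    by_cases hco : c = 'o'
    · rw [ho (by simp [hco]), hco]
    · have hb : (c == 'o') = false := by simp [hco]
      rw [hb]
      simp

theorem pvNScan_N_false (p : Char) (t : List Char)
    (hp : (p == 'a' || p == 'e' || p == 'i' || p == 'u') = false) :
    pvNScan p false ('N' :: t) = false := by
  simp only [pvNScan]
  simp at hp
  simp [hp]



theorem pvShapeAll : ∀ pr ∈ pvStages, ∃ x y ψ, pr = (([x,y] : List Char), ([ψ] : List Char)) := by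
  intro pr hpr; fin_cases hpr <;> exact ⟨_, _, _, rfl⟩

theorem pvSingleB : (pvAllowed.all (fun a => a == 'N' || (pvMapA.getD [a] [] == pvTableB.getD a []))) = true := by decide

theorem pvSingle : ∀ a ∈ pvAllowed, a ≠ 'N' → pvMapA.getD [a] [] = pvTableB.getD a [] := by
  intro a ha hN
  have h := List.all_eq_true.mp pvSingleB a ha
  simp [hN] at h
  exact h

theorem pvMemHs2B : (pvAllowed.all (fun d => d == 'N' || pvHs2.contains d)) = true := by decide

theorem pvMemHs2 : ∀ d ∈ pvAllowed, d ≠ 'N' → d ∈ pvHs2 := by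
  intro d hd hN
  have h := List.all_eq_true.mp pvMemHs2B d hd
  simp [hN] at h
  exact h

theorem pvMemHs3B : (pvAllowed.all (fun d => pvHs3.contains d)) = true := by decide

theorem pvMemHs3 : ∀ d ∈ pvAllowed, d ∈ pvHs3 := by
  intro d hd
  have h := List.all_eq_true.mp pvMemHs3B d hd
  simpa using h

theorem pvStagesKeysB : (pvStages.all (fun pr => pvMapA.contains pr.1)) = true := by decide

theorem pvStagesKeys : ∀ pr ∈ pvStages, pvMapA.contains pr.1 = true := by
  intro pr hpr
  exact List.all_eq_true.mp pvStagesKeysB pr hpr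

theorem pvCmap_cons (c : Char) (l : List Char) :
    pvCmap (c :: l) = pvTableB.getD c [] ++ pvCmap l := by simp [pvCmap]

theorem pvShapeAll2 : ∀ pr ∈ pvStages, ∃ x y ψ, pr = (([x,y] : List Char), ([ψ] : List Char)) ∧ y ∉ pvPH ∧ ψ ∈ pvPH := by
  intro pr hpr; fin_cases hpr <;> exact ⟨_, _, _, rfl, by decide, by decide⟩

theorem pvPairNe (x y a b : Char) (hy : y ∉ pvPH) (h : ([x,y] : List Char) ≠ [a,b]) :
    x ≠ a ∨ y ∉ (b :: pvPH) := by
  by_cases hx : x = a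
  · right
    intro hm
    rcases List.mem_cons.mp hm with rfl | hm2
    · exact h (by rw [hx])
    · exact hy hm2
  · exact Or.inl hx

theorem pvKey2 (a b : Char) (ha : a ∈ pvAllowed) (hb : b ∈ pvAllowed) (h : pvMapA.contains [a,b] = true) :
    (a = 'p' ∧ b = 'h') ∨ (a = 't' ∧ b = 'h') ∨ (a = 'c' ∧ b = 'h') ∨ (a = 'k' ∧ b = 'h') ∨
    (a = 'n' ∧ b = 'g') ∨ (a = 'o' ∧ b = 'o') ∨ (a = 'a' ∧ b = 'N') ∨ (a = 'e' ∧ b = 'N') ∨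
    (a = 'i' ∧ b = 'N') ∨ (a = 'o' ∧ b = 'N') ∨ (a = 'u' ∧ b = 'N') := by
  fin_cases ha <;> fin_cases hb <;> revert h <;> decide

theorem pvStep (x y ψ : Char) (S1 S2 : List (List Char × List Char))
    (hsplit : pvStages = S1 ++ ([x,y],[ψ]) :: S2)
    (h1 : ∀ pr ∈ S1, ∃ a b φ, pr = (([a,b] : List Char), ([φ] : List Char)) ∧ (a ≠ x ∨ b ∉ (y :: pvPH)) ∧ φ ∈ (y :: pvPH))
    (h2 : ∀ pr ∈ S1, ∃ a b φ, pr = (([a,b] : List Char), ([φ] : List Char)) ∧ (a ≠ y ∨ b ∉ pvHs2) ∧ φ ∈ pvHs2)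
    (h3 : ∀ pr ∈ S2, ∃ a b φ, pr = (([a,b] : List Char), ([φ] : List Char)) ∧ a ≠ ψ ∧ φ ∈ pvHs3)
    (hψ3 : ψ ∈ pvHs3)
    (t : List Char) (ht : (t.all (pvAllowed.contains ·)) = true) (hhd : t.head? ≠ some 'N') :
    pvRun pvStages (x :: y :: t) = ψ :: pvRun pvStages t := by
  rw [hsplit]
  apply pvRun_match S1 S2 x y ψ t h1 h2 h3 hψ3
  · intro d hd
    cases t with
    | nil => simp at hd
    | cons c t' =>
      simp only [List.head?_cons, Option.some.injEq] at hd
      subst hd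
      simp only [List.all_cons, Bool.and_eq_true] at ht
      refine pvMemHs2 _ (by simpa using ht.1) ?_
      intro h
      exact hhd (by simp [h])
  · intro d hd
    cases t with
    | nil => simp at hd
    | cons c t' =>
      simp only [List.head?_cons, Option.some.injEq] at hd
      subst hd
      simp only [List.all_cons, Bool.and_eq_true] at ht
      exact pvMemHs3 _ (by simpa using ht.1)

theorem pvMain : ∀ (n : Nat) (l : List Char), l.length ≤ n →
    (l.all (pvAllowed.contains ·)) = true → pvNScan '^' false l = true →
    pvTok l = pvCmap (pvRun pvStages l) := by
  intro n
  induction n with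
  | zero =>
    intro l hlen _ _
    have hl : l = [] := List.eq_nil_of_length_eq_zero (Nat.le_zero.mp hlen)
    subst hl
    rw [pvRun_nil _ pvShapeAll]
    rfl
  | succ n ih =>
    intro l hlen hall hscan
    rcases l with _ | ⟨a, _ | ⟨b, t⟩⟩
    · rw [pvRun_nil _ pvShapeAll]
      rfl
    · have haN : a ≠ 'N' := by
        rintro rfl
        rw [pvNScan_N_false '^' [] (by decide)] at hscan
        simp at hscan
      have haA : a ∈ pvAllowed := by
        simp only [List.all_cons, List.all_nil, Bool.and_true] at hall
        simpa using hall
      rw [pvRun_single _ pvShapeAll]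
      show pvMapA.getD [a] [] = pvCmap [a]
      rw [pvCmap_cons]
      simp [pvCmap]
      exact pvSingle a haA haN
    · by_cases hct : pvMapA.contains [a,b] = true
      · have haA2 : a ∈ pvAllowed := by
          simp only [List.all_cons, Bool.and_eq_true] at hall
          simpa using hall.1
        have hbA2 : b ∈ pvAllowed := by
          simp only [List.all_cons, Bool.and_eq_true] at hall
          simpa using hall.2.1
        rcases pvKey2 a b haA2 hbA2 hct with ⟨rfl,rfl⟩|⟨rfl,rfl⟩|⟨rfl,rfl⟩|⟨rfl,rfl⟩|⟨rfl,rfl⟩|⟨rfl,rfl⟩|⟨rfl,rfl⟩|⟨rfl,rfl⟩|⟨rfl,rfl⟩|⟨rfl,rfl⟩|⟨rfl,rfl⟩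
        · -- digraph 'p' 'h'
          simp [pvNScan] at hscan
          simp only [List.all_cons, Bool.and_eq_true] at hall
          have ht := hall.2.2
          have hhd : t.head? ≠ some 'N' := by
            cases t with
            | nil => simp
            | cons c t' =>
              simp only [List.head?, ne_eq, Option.some.injEq]
              intro hc
              rw [hc, pvNScan_N_false _ _ (by decide)] at hscan
              simp at hscan
          have hsc' : pvNScan '^' false t = true := by
            rwa [pvNScan_congr t 'h' '^' false false hhd (fun _ => rfl)] at hscan
          rw [pvStep 'p' 'h' 'P' [((['a','N'] : List Char), (['A'] : List Char)), ((['e','N'] : List Char), (['E'] : List Char)), ((['i','N'] : List Char), (['I'] : List Char)), ((['o','N'] : List Char), (['Q'] : List Char)), ((['u','N'] : List Char), (['U'] : List Char))] [((['t','h'] : List Char), (['T'] : List Char)), ((['c','h'] : List Char), (['C'] : List Char)), ((['k','h'] : List Char), (['K'] : List Char)), ((['n','g'] : List Char), (['G'] : List Char)), ((['o','o'] : List Char), (['O'] : List Char))] rfl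
            (by intro pr hpr; fin_cases hpr <;> exact ⟨_, _, _, rfl, by decide, by decide⟩)
            (by intro pr hpr; fin_cases hpr <;> exact ⟨_, _, _, rfl, by decide, by decide⟩)
            (by intro pr hpr; fin_cases hpr <;> exact ⟨_, _, _, rfl, by decide, by decide⟩)
            (by decide) t ht hhd]
          rw [pvCmap_cons, pvTok, if_pos (by decide)]
          rw [← ih t (by simp only [List.length_cons] at hlen; omega) ht hsc']
          congr 1
        · -- digraph 't' 'h'
          simp [pvNScan] at hscan
          simp only [List.all_cons, Bool.and_eq_true] at hall
          have ht := hall.2.2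
          have hhd : t.head? ≠ some 'N' := by
            cases t with
            | nil => simp
            | cons c t' =>
              simp only [List.head?, ne_eq, Option.some.injEq]
              intro hc
              rw [hc, pvNScan_N_false _ _ (by decide)] at hscan
              simp at hscan
          have hsc' : pvNScan '^' false t = true := by
            rwa [pvNScan_congr t 'h' '^' false false hhd (fun _ => rfl)] at hscan
          rw [pvStep 't' 'h' 'T' [((['a','N'] : List Char), (['A'] : List Char)), ((['e','N'] : List Char), (['E'] : List Char)), ((['i','N'] : List Char), (['I'] : List Char)), ((['o','N'] : List Char), (['Q'] : List Char)), ((['u','N'] : List Char), (['U'] : List Char)), ((['p','h'] : List Char), (['P'] : List Char))] [((['c','h'] : List Char), (['C'] : List Char)), ((['k','h'] : List Char), (['K'] : List Char)), ((['n','g'] : List Char), (['G'] : List Char)), ((['o','o'] : List Char), (['O'] : List Char))] rfl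
            (by intro pr hpr; fin_cases hpr <;> exact ⟨_, _, _, rfl, by decide, by decide⟩)
            (by intro pr hpr; fin_cases hpr <;> exact ⟨_, _, _, rfl, by decide, by decide⟩)
            (by intro pr hpr; fin_cases hpr <;> exact ⟨_, _, _, rfl, by decide, by decide⟩)
            (by decide) t ht hhd]
          rw [pvCmap_cons, pvTok, if_pos (by decide)]
          rw [← ih t (by simp only [List.length_cons] at hlen; omega) ht hsc']
          congr 1
        · -- digraph 'c' 'h'
          simp [pvNScan] at hscan
          simp only [List.all_cons, Bool.and_eq_true] at hall
          have ht := hall.2.2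
          have hhd : t.head? ≠ some 'N' := by
            cases t with
            | nil => simp
            | cons c t' =>
              simp only [List.head?, ne_eq, Option.some.injEq]
              intro hc
              rw [hc, pvNScan_N_false _ _ (by decide)] at hscan
              simp at hscan
          have hsc' : pvNScan '^' false t = true := by
            rwa [pvNScan_congr t 'h' '^' false false hhd (fun _ => rfl)] at hscan
          rw [pvStep 'c' 'h' 'C' [((['a','N'] : List Char), (['A'] : List Char)), ((['e','N'] : List Char), (['E'] : List Char)), ((['i','N'] : List Char), (['I'] : List Char)), ((['o','N'] : List Char), (['Q'] : List Char)), ((['u','N'] : List Char), (['U'] : List Char)), ((['p','h'] : List Char), (['P'] : List Char)), ((['t','h'] : List Char), (['T'] : List Char))] [((['k','h'] : List Char), (['K'] : List Char)), ((['n','g'] : List Char), (['G'] : List Char)), ((['o','o'] : List Char), (['O'] : List Char))] rfl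
            (by intro pr hpr; fin_cases hpr <;> exact ⟨_, _, _, rfl, by decide, by decide⟩)
            (by intro pr hpr; fin_cases hpr <;> exact ⟨_, _, _, rfl, by decide, by decide⟩)
            (by intro pr hpr; fin_cases hpr <;> exact ⟨_, _, _, rfl, by decide, by decide⟩)
            (by decide) t ht hhd]
          rw [pvCmap_cons, pvTok, if_pos (by decide)]
          rw [← ih t (by simp only [List.length_cons] at hlen; omega) ht hsc']
          congr 1
        · -- digraph 'k' 'h'
          simp [pvNScan] at hscan
          simp only [List.all_cons, Bool.and_eq_true] at hall
          have ht := hall.2.2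
          have hhd : t.head? ≠ some 'N' := by
            cases t with
            | nil => simp
            | cons c t' =>
              simp only [List.head?, ne_eq, Option.some.injEq]
              intro hc
              rw [hc, pvNScan_N_false _ _ (by decide)] at hscan
              simp at hscan
          have hsc' : pvNScan '^' false t = true := by
            rwa [pvNScan_congr t 'h' '^' false false hhd (fun _ => rfl)] at hscan
          rw [pvStep 'k' 'h' 'K' [((['a','N'] : List Char), (['A'] : List Char)), ((['e','N'] : List Char), (['E'] : List Char)), ((['i','N'] : List Char), (['I'] : List Char)), ((['o','N'] : List Char), (['Q'] : List Char)), ((['u','N'] : List Char), (['U'] : List Char)), ((['p','h'] : List Char), (['P'] : List Char)), ((['t','h'] : List Char), (['T'] : List Char)), ((['c','h'] : List Char), (['C'] : List Char))] [((['n','g'] : List Char), (['G'] : List Char)), ((['o','o'] : List Char), (['O'] : List Char))] rfl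
            (by intro pr hpr; fin_cases hpr <;> exact ⟨_, _, _, rfl, by decide, by decide⟩)
            (by intro pr hpr; fin_cases hpr <;> exact ⟨_, _, _, rfl, by decide, by decide⟩)
            (by intro pr hpr; fin_cases hpr <;> exact ⟨_, _, _, rfl, by decide, by decide⟩)
            (by decide) t ht hhd]
          rw [pvCmap_cons, pvTok, if_pos (by decide)]
          rw [← ih t (by simp only [List.length_cons] at hlen; omega) ht hsc']
          congr 1
        · -- digraph 'n' 'g'
          simp [pvNScan] at hscan
          simp only [List.all_cons, Bool.and_eq_true] at hall
          have ht := hall.2.2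
          have hhd : t.head? ≠ some 'N' := by
            cases t with
            | nil => simp
            | cons c t' =>
              simp only [List.head?, ne_eq, Option.some.injEq]
              intro hc
              rw [hc, pvNScan_N_false _ _ (by decide)] at hscan
              simp at hscan
          have hsc' : pvNScan '^' false t = true := by
            rwa [pvNScan_congr t 'g' '^' false false hhd (fun _ => rfl)] at hscan
          rw [pvStep 'n' 'g' 'G' [((['a','N'] : List Char), (['A'] : List Char)), ((['e','N'] : List Char), (['E'] : List Char)), ((['i','N'] : List Char), (['I'] : List Char)), ((['o','N'] : List Char), (['Q'] : List Char)), ((['u','N'] : List Char), (['U'] : List Char)), ((['p','h'] : List Char), (['P'] : List Char)), ((['t','h'] : List Char), (['T'] : List Char)), ((['c','h'] : List Char), (['C'] : List Char)), ((['k','h'] : List Char), (['K'] : List Char))] [((['o','o'] : List Char), (['O'] : List Char))] rfl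
            (by intro pr hpr; fin_cases hpr <;> exact ⟨_, _, _, rfl, by decide, by decide⟩)
            (by intro pr hpr; fin_cases hpr <;> exact ⟨_, _, _, rfl, by decide, by decide⟩)
            (by intro pr hpr; fin_cases hpr <;> exact ⟨_, _, _, rfl, by decide, by decide⟩)
            (by decide) t ht hhd]
          rw [pvCmap_cons, pvTok, if_pos (by decide)]
          rw [← ih t (by simp only [List.length_cons] at hlen; omega) ht hsc']
          congr 1
        · -- digraph 'o' 'o'
          simp [pvNScan] at hscan
          simp only [List.all_cons, Bool.and_eq_true] at hall
          have ht := hall.2.2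
          have hhd : t.head? ≠ some 'N' := by
            cases t with
            | nil => simp
            | cons c t' =>
              simp only [List.head?, ne_eq, Option.some.injEq]
              intro hc
              rw [hc, pvNScan_N_false _ _ (by decide)] at hscan
              simp at hscan
          have hsc' : pvNScan '^' false t = true := by
            rwa [pvNScan_congr t 'o' '^' false false hhd (fun _ => rfl)] at hscan
          rw [pvStep 'o' 'o' 'O' [((['a','N'] : List Char), (['A'] : List Char)), ((['e','N'] : List Char), (['E'] : List Char)), ((['i','N'] : List Char), (['I'] : List Char)), ((['o','N'] : List Char), (['Q'] : List Char)), ((['u','N'] : List Char), (['U'] : List Char)), ((['p','h'] : List Char), (['P'] : List Char)), ((['t','h'] : List Char), (['T'] : List Char)), ((['c','h'] : List Char), (['C'] : List Char)), ((['k','h'] : List Char), (['K'] : List Char)), ((['n','g'] : List Char), (['G'] : List Char))] [] rfl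
            (by intro pr hpr; fin_cases hpr <;> exact ⟨_, _, _, rfl, by decide, by decide⟩)
            (by intro pr hpr; fin_cases hpr <;> exact ⟨_, _, _, rfl, by decide, by decide⟩)
            (by intro pr hpr; fin_cases hpr)
            (by decide) t ht hhd]
          rw [pvCmap_cons, pvTok, if_pos (by decide)]
          rw [← ih t (by simp only [List.length_cons] at hlen; omega) ht hsc']
          congr 1
        · -- digraph 'a' 'N'
          simp [pvNScan] at hscan
          simp only [List.all_cons, Bool.and_eq_true] at hall
          have ht := hall.2.2
          have hhd : t.head? ≠ some 'N' := by
            cases t with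
            | nil => simp
            | cons c t' =>
              simp only [List.head?, ne_eq, Option.some.injEq]
              intro hc
              rw [hc, pvNScan_N_false _ _ (by decide)] at hscan
              simp at hscan
          have hsc' : pvNScan '^' false t = true := by
            rwa [pvNScan_congr t 'N' '^' false false hhd (fun _ => rfl)] at hscan
          rw [pvStep 'a' 'N' 'A' [] [((['e','N'] : List Char), (['E'] : List Char)), ((['i','N'] : List Char), (['I'] : List Char)), ((['o','N'] : List Char), (['Q'] : List Char)), ((['u','N'] : List Char), (['U'] : List Char)), ((['p','h'] : List Char), (['P'] : List Char)), ((['t','h'] : List Char), (['T'] : List Char)), ((['c','h'] : List Char), (['C'] : List Char)), ((['k','h'] : List Char), (['K'] : List Char)), ((['n','g'] : List Char), (['G'] : List Char)), ((['o','o'] : List Char), (['O'] : List Char))] rfl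
            (by intro pr hpr; fin_cases hpr)
            (by intro pr hpr; fin_cases hpr)
            (by intro pr hpr; fin_cases hpr <;> exact ⟨_, _, _, rfl, by decide, by decide⟩)
            (by decide) t ht hhd]
          rw [pvCmap_cons, pvTok, if_pos (by decide)]
          rw [← ih t (by simp only [List.length_cons] at hlen; omega) ht hsc']
          congr 1
        · -- digraph 'e' 'N'
          simp [pvNScan] at hscan
          simp only [List.all_cons, Bool.and_eq_true] at hall
          have ht := hall.2.2
          have hhd : t.head? ≠ some 'N' := by
            cases t with
            | nil => simp
            | cons c t' =>
              simp only [List.head?, ne_eq, Option.some.injEq]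
              intro hc
              rw [hc, pvNScan_N_false _ _ (by decide)] at hscan
              simp at hscan
          have hsc' : pvNScan '^' false t = true := by
            rwa [pvNScan_congr t 'N' '^' false false hhd (fun _ => rfl)] at hscan
          rw [pvStep 'e' 'N' 'E' [((['a','N'] : List Char), (['A'] : List Char))] [((['i','N'] : List Char), (['I'] : List Char)), ((['o','N'] : List Char), (['Q'] : List Char)), ((['u','N'] : List Char), (['U'] : List Char)), ((['p','h'] : List Char), (['P'] : List Char)), ((['t','h'] : List Char), (['T'] : List Char)), ((['c','h'] : List Char), (['C'] : List Char)), ((['k','h'] : List Char), (['K'] : List Char)), ((['n','g'] : List Char), (['G'] : List Char)), ((['o','o'] : List Char), (['O'] : List Char))] rfl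
            (by intro pr hpr; fin_cases hpr <;> exact ⟨_, _, _, rfl, by decide, by decide⟩)
            (by intro pr hpr; fin_cases hpr <;> exact ⟨_, _, _, rfl, by decide, by decide⟩)
            (by intro pr hpr; fin_cases hpr <;> exact ⟨_, _, _, rfl, by decide, by decide⟩)
            (by decide) t ht hhd]
          rw [pvCmap_cons, pvTok, if_pos (by decide)]
          rw [← ih t (by simp only [List.length_cons] at hlen; omega) ht hsc']
          congr 1
        · -- digraph 'i' 'N'
          simp [pvNScan] at hscan
          simp only [List.all_cons, Bool.and_eq_true] at hall
          have ht := hall.2.2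
          have hhd : t.head? ≠ some 'N' := by
            cases t with
            | nil => simp
            | cons c t' =>
              simp only [List.head?, ne_eq, Option.some.injEq]
              intro hc
              rw [hc, pvNScan_N_false _ _ (by decide)] at hscan
              simp at hscan
          have hsc' : pvNScan '^' false t = true := by
            rwa [pvNScan_congr t 'N' '^' false false hhd (fun _ => rfl)] at hscan
          rw [pvStep 'i' 'N' 'I' [((['a','N'] : List Char), (['A'] : List Char)), ((['e','N'] : List Char), (['E'] : List Char))] [((['o','N'] : List Char), (['Q'] : List Char)), ((['u','N'] : List Char), (['U'] : List Char)), ((['p','h'] : List Char), (['P'] : List Char)), ((['t','h'] : List Char), (['T'] : List Char)), ((['c','h'] : List Char), (['C'] : List Char)), ((['k','h'] : List Char), (['K'] : List Char)), ((['n','g'] : List Char), (['G'] : List Char)), ((['o','o'] : List Char), (['O'] : List Char))] rfl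
            (by intro pr hpr; fin_cases hpr <;> exact ⟨_, _, _, rfl, by decide, by decide⟩)
            (by intro pr hpr; fin_cases hpr <;> exact ⟨_, _, _, rfl, by decide, by decide⟩)
            (by intro pr hpr; fin_cases hpr <;> exact ⟨_, _, _, rfl, by decide, by decide⟩)
            (by decide) t ht hhd]
          rw [pvCmap_cons, pvTok, if_pos (by decide)]
          rw [← ih t (by simp only [List.length_cons] at hlen; omega) ht hsc']
          congr 1
        · -- digraph 'o' 'N'
          simp [pvNScan] at hscan
          simp only [List.all_cons, Bool.and_eq_true] at hall
          have ht := hall.2.2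
          have hhd : t.head? ≠ some 'N' := by
            cases t with
            | nil => simp
            | cons c t' =>
              simp only [List.head?, ne_eq, Option.some.injEq]
              intro hc
              rw [hc, pvNScan_N_false _ _ (by decide)] at hscan
              simp at hscan
          have hsc' : pvNScan '^' false t = true := by
            rwa [pvNScan_congr t 'N' '^' false false hhd (fun _ => rfl)] at hscan
          rw [pvStep 'o' 'N' 'Q' [((['a','N'] : List Char), (['A'] : List Char)), ((['e','N'] : List Char), (['E'] : List Char)), ((['i','N'] : List Char), (['I'] : List Char))] [((['u','N'] : List Char), (['U'] : List Char)), ((['p','h'] : List Char), (['P'] : List Char)), ((['t','h'] : List Char), (['T'] : List Char)), ((['c','h'] : List Char), (['C'] : List Char)), ((['k','h'] : List Char), (['K'] : List Char)), ((['n','g'] : List Char), (['G'] : List Char)), ((['o','o'] : List Char), (['O'] : List Char))] rfl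
            (by intro pr hpr; fin_cases hpr <;> exact ⟨_, _, _, rfl, by decide, by decide⟩)
            (by intro pr hpr; fin_cases hpr <;> exact ⟨_, _, _, rfl, by decide, by decide⟩)
            (by intro pr hpr; fin_cases hpr <;> exact ⟨_, _, _, rfl, by decide, by decide⟩)
            (by decide) t ht hhd]
          rw [pvCmap_cons, pvTok, if_pos (by decide)]
          rw [← ih t (by simp only [List.length_cons] at hlen; omega) ht hsc']
          congr 1
        · -- digraph 'u' 'N'
          simp [pvNScan] at hscan
          simp only [List.all_cons, Bool.and_eq_true] at hall
          have ht := hall.2.2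
          have hhd : t.head? ≠ some 'N' := by
            cases t with
            | nil => simp
            | cons c t' =>
              simp only [List.head?, ne_eq, Option.some.injEq]
              intro hc
              rw [hc, pvNScan_N_false _ _ (by decide)] at hscan
              simp at hscan
          have hsc' : pvNScan '^' false t = true := by
            rwa [pvNScan_congr t 'N' '^' false false hhd (fun _ => rfl)] at hscan
          rw [pvStep 'u' 'N' 'U' [((['a','N'] : List Char), (['A'] : List Char)), ((['e','N'] : List Char), (['E'] : List Char)), ((['i','N'] : List Char), (['I'] : List Char)), ((['o','N'] : List Char), (['Q'] : List Char))] [((['p','h'] : List Char), (['P'] : List Char)), ((['t','h'] : List Char), (['T'] : List Char)), ((['c','h'] : List Char), (['C'] : List Char)), ((['k','h'] : List Char), (['K'] : List Char)), ((['n','g'] : List Char), (['G'] : List Char)), ((['o','o'] : List Char), (['O'] : List Char))] rfl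
            (by intro pr hpr; fin_cases hpr <;> exact ⟨_, _, _, rfl, by decide, by decide⟩)
            (by intro pr hpr; fin_cases hpr <;> exact ⟨_, _, _, rfl, by decide, by decide⟩)
            (by intro pr hpr; fin_cases hpr <;> exact ⟨_, _, _, rfl, by decide, by decide⟩)
            (by decide) t ht hhd]
          rw [pvCmap_cons, pvTok, if_pos (by decide)]
          rw [← ih t (by simp only [List.length_cons] at hlen; omega) ht hsc']
          congr 1
      · have haN : a ≠ 'N' := by
          rintro rfl
          rw [pvNScan_N_false '^' _ (by decide)] at hscan
          simp at hscan
        simp only [List.all_cons, Bool.and_eq_true] at hall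
        have haA : a ∈ pvAllowed := by simpa using hall.1
        have hbA : b ∈ pvAllowed := by simpa using hall.2.1
        have htall : ((b :: t).all (pvAllowed.contains ·)) = true := by
          simp only [List.all_cons, Bool.and_eq_true]
          exact ⟨hall.2.1, hall.2.2⟩
        have hstages_ne : ∀ pr ∈ pvStages, pr.1 ≠ [a,b] := by
          intro pr hpr hpe
          exact hct (by rw [← hpe]; exact pvStagesKeys pr hpr)
        have hbN : b ≠ 'N' := by
          rintro rfl
          fin_cases haA <;>
            first
              | exact hct (by decide)
              | simp [pvNScan] at hscan
        have hao : ¬ (a = 'o' ∧ b = 'o') := by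
          rintro ⟨rfl, rfl⟩
          exact hct (by decide)
        have hstate : (decide (b = 'o') && !decide (a = 'o')) = decide (b = 'o') := by
          by_cases hb : b = 'o'
          · have ha' : a ≠ 'o' := fun h => hao ⟨h, hb⟩
            simp [hb, ha']
          · simp [hb]
        have hrun : pvRun pvStages (a :: b :: t) = a :: pvRun pvStages (b :: t) := by
          refine pvRun_cons pvStages a (b :: t) (b :: pvPH) ?_ ?_
          · intro pr hpr
            obtain ⟨x, y, ψ, rfl, hy, hψ⟩ := pvShapeAll2 pr hpr
            exact ⟨x, y, ψ, rfl, pvPairNe x y a b hy (hstages_ne _ hpr),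
              List.mem_cons_of_mem _ hψ⟩
          · intro d hd
            simp only [List.head?, Option.some.injEq] at hd
            subst hd
            exact List.mem_cons_self
        have hscan' : pvNScan '^' false (b :: t) = true := by
          simp [pvNScan, haN, hbN, hstate] at hscan ⊢
          convert hscan using 2
        rw [hrun, pvCmap_cons, pvTok, if_neg hct]
        rw [← ih (b :: t) (by simp only [List.length_cons] at hlen ⊢; omega) htall hscan']
        rw [pvSingle a haA haN]


theorem pvLoop_eq_tok (s : List Char) : ∀ (k i : Nat) (acc : List Char), s.length - i ≤ k →
    pvLoopA s i acc = acc ++ pvTok (s.drop i) := by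
  intro k
  induction k with
  | zero =>
    intro i acc hk
    have hi : ¬ i < s.length := by omega
    rw [pvLoopA, dif_neg hi, List.drop_eq_nil_of_le (by omega)]
    simp [pvTok]
  | succ k ih =>
    intro i acc hk
    by_cases hi : i < s.length
    · have hcast : ((i : Int) + 2) = ((i + 2 : Nat) : Int) := by push_cast; ring
      have hslice : PySem.List.slice s (some (i : Int)) (some ((i : Int) + 2)) =
          List.take 2 (List.drop i s) := by
        rw [hcast, PySem.List.slice_natCast]
        congr 1
        omega
      have hget : (PySem.List.pyGet? s (i : Int)).getD ' ' = s[i] := by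
        rw [PySem.List.pyGet?_natCast, List.getElem?_eq_getElem hi]
        rfl
      have hdrop : List.drop i s = s[i] :: List.drop (i+1) s := List.drop_eq_getElem_cons hi
      by_cases hlast : i = s.length - 1
      · have hnil : List.drop (i+1) s = [] := List.drop_eq_nil_of_le (by omega)
        rw [pvLoopA, dif_pos hi, if_neg (by tauto)]
        rw [ih (i+1) _ (by omega), hget, hnil, hdrop, hnil]
        simp [pvTok]
      · have hi1 : i + 1 < s.length := by omega
        have hdrop1 : List.drop (i+1) s = s[i+1] :: List.drop (i+2) s :=
          List.drop_eq_getElem_cons hi1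
        have htake : List.take 2 (List.drop i s) = [s[i], s[i+1]] := by
          rw [hdrop, hdrop1]; rfl
        rw [pvLoopA, dif_pos hi, hslice, htake, hget]
        rw [hdrop, hdrop1]
        by_cases hc : pvMapA.contains [s[i], s[i+1]] = true
        · rw [if_pos ⟨hlast, hc⟩]
          rw [ih (i+2) _ (by omega)]
          show _ = acc ++ pvTok (s[i] :: s[i+1] :: List.drop (i+2) s)
          rw [pvTok, if_pos hc]
          simp
        · rw [if_neg (by tauto)]
          rw [ih (i+1) _ (by omega), hdrop1]
          show _ = acc ++ pvTok (s[i] :: s[i+1] :: List.drop (i+2) s)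
          rw [pvTok, if_neg hc]
          simp
    · rw [pvLoopA, dif_neg hi, List.drop_eq_nil_of_le (by omega)]
      simp [pvTok]

-- ===== VERDICT (by name: the statement is the Claim_ definition above) =====
theorem nanToIPA_spec : Claim_equal_nanToIPA := by
  intro nan _ hpre
  unfold Spec_nanToIPA nanToIPA nanToIPA_alt
  rcases hpre with ⟨hall, hscan⟩
  have h1 : pvLoopA (pvPre nan.toList) 0 [] = pvTok (pvPre nan.toList) := by
    simpa using pvLoop_eq_tok (pvPre nan.toList) (pvPre nan.toList).length 0 [] (by omega)
  rw [h1, pvMain (pvPre nan.toList).length _ le_rfl hall hscan]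
  rfl
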